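-- pv_equiv track=rewrite | github.com/amne/aoc25 | day03/main.py | find_max_jolts_r
-- ===== SOURCE A (Python) =====
-- def find_max_jolts_r(battery_bank, num_batteries = 0):
--     if num_batteries == 11:
--         return str(max(battery_bank))
--     if len(battery_bank) == 1:
--         return str(battery_bank[0])
--     max_jolts = max(battery_bank[:-11+num_batteries])
--     max_index = battery_bank.index(max_jolts)
--     return str(max_jolts) + find_max_jolts_r(battery_bank[max_index+1:], num_batteries + 1)
-- ===== SOURCE B (Python) =====
-- def find_max_jolts_r(battery_bank, num_batteries=0):
--     parts = []
--     bank = battery_bank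
--     while num_batteries < 11 and len(bank) > 1:
--         window = bank[:-11 + num_batteries]
--         best = 0
--         for i in range(1, len(window)):
--             if window[i] > window[best]:
--                 best = i
--         parts.append(str(window[best]))
--         bank = bank[best + 1:]
--         num_batteries += 1
--     parts.append(str(max(bank)) if len(bank) > 1 else str(bank[0]))
--     return "".join(parts)
-- ===== Notes on version B (the rewrite author's own statement) =====
-- stated objective: alternative
-- what changed: The recursive greedy (max() over a slice, then .index() over the whole list, then recursion on a suffix) is replaced by an iterative loop that finds the leftmost argmax of the admissible prefix in one indexed pass per step and joins the collected parts at the end.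
-- outside the precondition, e.g. on find_max_jolts_r([5, 1], 12): A returns '51', B returns '5'
import Mathlib
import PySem

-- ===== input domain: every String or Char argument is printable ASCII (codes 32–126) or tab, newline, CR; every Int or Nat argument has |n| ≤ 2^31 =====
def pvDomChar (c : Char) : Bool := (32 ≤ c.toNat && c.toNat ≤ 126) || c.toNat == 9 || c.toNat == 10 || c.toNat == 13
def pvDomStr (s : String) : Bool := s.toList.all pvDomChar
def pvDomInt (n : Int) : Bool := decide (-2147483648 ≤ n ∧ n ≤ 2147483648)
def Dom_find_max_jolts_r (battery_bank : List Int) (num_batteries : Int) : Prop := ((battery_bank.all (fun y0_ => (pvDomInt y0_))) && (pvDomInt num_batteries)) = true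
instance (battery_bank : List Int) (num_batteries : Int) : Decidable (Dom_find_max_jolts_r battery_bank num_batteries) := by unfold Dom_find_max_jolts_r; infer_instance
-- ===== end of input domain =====

-- B replaces the recursive max()+.index()+slice greedy by an iterative loop with a single
-- leftmost-argmax pass per pick (objective: alternative decomposition, same cost).

-- ===== PORT A =====
-- literal port of A; the `none => ""` match arms are the ValueError spots, excluded by Pre_
def find_max_jolts_r (battery_bank : List Int) (num_batteries : Int) : String :=
  if num_batteries = 11 then
    match PySem.List.max? battery_bank (fun x => x) with
    | none => ""            -- max() on empty list raises ValueError (outside Pre_)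
    | some m => PySem.Int.toStr m
  else if battery_bank.length = 1 then
    PySem.Int.toStr (PySem.List.pyGetD battery_bank 0 0)
  else
    match PySem.List.max? (PySem.List.slice battery_bank none (some (-11 + num_batteries))) (fun x => x) with
    | none => ""            -- max() on empty slice raises ValueError (outside Pre_)
    | some m =>
      match h : PySem.List.index? battery_bank m with
      | none => ""          -- unreachable: m ∈ battery_bank
      | some i =>
        PySem.Int.toStr m ++
          find_max_jolts_r (PySem.List.slice battery_bank (some ((i : Int) + 1)) none) (num_batteries + 1)
termination_by battery_bank.length
decreasing_by
  have hm : m ∈ battery_bank := by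
    have := (PySem.List.index?_eq_some_iff battery_bank m i).mp h
    obtain ⟨pre, suf, hx, -, -⟩ := this
    simp [hx]
  have hlen : 0 < battery_bank.length := List.length_pos_of_mem hm
  have e : ((i : Int) + 1) = ((i + 1 : Nat) : Int) := by push_cast; ring
  rw [e, PySem.List.slice_from_natCast]
  simp only [List.length_drop]
  omega

-- ===== PORT B =====
-- port of Source B's while-loop; `parts` is the accumulated "".join prefix
def altLoop (parts : String) (bank : List Int) (num : Int) : String :=
  if num < 11 ∧ 1 < bank.length then
    let window := PySem.List.slice bank none (some (-11 + num))
    let best :=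
      (PySem.List.pyRange 1 (window.length : Int) 1).foldl
        (fun b i => if PySem.List.pyGetD window i 0 > PySem.List.pyGetD window b 0 then i else b) 0
    altLoop (parts ++ PySem.Int.toStr (PySem.List.pyGetD window best 0))
      (PySem.List.slice bank (some (best + 1)) none) (num + 1)
  else
    parts ++
      (if 1 < bank.length then
        match PySem.List.max? bank (fun x => x) with
        | none => ""        -- unreachable under Pre_
        | some m => PySem.Int.toStr m
      else PySem.Int.toStr (PySem.List.pyGetD bank 0 0))
termination_by (11 - num).toNat
decreasing_by omega

def find_max_jolts_r_alt (battery_bank : List Int) (num_batteries : Int) : String :=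
  altLoop "" battery_bank num_batteries

-- ===== PRECONDITION & SPEC =====
-- Pre_ excludes the inputs where A's max() on an empty slice raises ValueError, and the
-- inputs with num_batteries > 11 and more than one battery (never reached from the intended
-- entry num_batteries = 0), where whether A returns or raises depends recursively on the
-- positions of the maxima and is not a closed-form condition.
def Pre_find_max_jolts_r (battery_bank : List Int) (num_batteries : Int) : Prop :=
  battery_bank.length = 1 ∨
    (num_batteries ≤ 11 ∧ 12 - num_batteries ≤ (battery_bank.length : Int))
instance (battery_bank : List Int) (num_batteries : Int) : Decidable (Pre_find_max_jolts_r battery_bank num_batteries) := by unfold Pre_find_max_jolts_r; infer_instance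

def pvWitness_find_max_jolts_r : List Int × Int := ([12, 3, 5, 1, 0, 2, 4, 6, 7, 8, 9, 10, 11], 0)

def Spec_find_max_jolts_r (battery_bank : List Int) (num_batteries : Int) (out : String) : Prop := out = find_max_jolts_r_alt battery_bank num_batteries
instance (battery_bank : List Int) (num_batteries : Int) (out : String) : Decidable (Spec_find_max_jolts_r battery_bank num_batteries out) := by unfold Spec_find_max_jolts_r; infer_instance

-- ===== CLAIM (what is proved, stated in full; the proofs are below) =====
def Claim_equal_find_max_jolts_r : Prop := ∀ (battery_bank : List Int) (num_batteries : Int), Dom_find_max_jolts_r battery_bank num_batteries → Pre_find_max_jolts_r battery_bank num_batteries → Spec_find_max_jolts_r battery_bank num_batteries (find_max_jolts_r battery_bank num_batteries)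

-- ===== LEMMAS AND PROOFS =====


-- leftmost-argmax invariant for B's inner for-loop
theorem argmax_inv (xs : List Int) : ∀ (j : Nat), 1 ≤ j → j ≤ xs.length →
    ∃ bn : Nat,
      (PySem.List.pyRange 1 (j : Int) 1).foldl
          (fun b i => if PySem.List.pyGetD xs i 0 > PySem.List.pyGetD xs b 0 then i else b) 0
        = (bn : Int) ∧
      bn < j ∧ (∀ t, t < j → xs.getD t 0 ≤ xs.getD bn 0) ∧
      (∀ t, t < bn → xs.getD t 0 < xs.getD bn 0) := by
  intro j hj1 hjlen
  induction j, hj1 using Nat.le_induction with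
  | base =>
    refine ⟨0, ?_, by omega, ?_, by omega⟩
    · norm_num
    · intro t ht; interval_cases t; exact le_refl _
  | succ j hj ih =>
    obtain ⟨bn, hfold, hbnj, hmax, hleft⟩ := ih (by omega)
    have hcast : ((j + 1 : Nat) : Int) = (j : Int) + 1 := by push_cast; ring
    have hrange : PySem.List.pyRange 1 ((j + 1 : Nat) : Int) 1
        = PySem.List.pyRange 1 (j : Int) 1 ++ [(j : Int)] := by
      rw [hcast, PySem.List.pyRange_one_succ_right (by exact_mod_cast hj)]
    rw [hrange, List.foldl_append, hfold]
    simp only [List.foldl, PySem.List.pyGetD_natCast]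
    by_cases hc : xs.getD j 0 > xs.getD bn 0
    · refine ⟨j, by rw [if_pos hc], by omega, ?_, ?_⟩
      · intro t ht
        rcases Nat.lt_succ_iff_lt_or_eq.mp ht with h | h
        · exact le_of_lt (lt_of_le_of_lt (hmax t h) hc)
        · subst h; exact le_refl _
      · intro t ht
        exact lt_of_le_of_lt (hmax t ht) hc
    · refine ⟨bn, by rw [if_neg hc], by omega, ?_, hleft⟩
      intro t ht
      rcases Nat.lt_succ_iff_lt_or_eq.mp ht with h | h
      · exact hmax t h
      · subst h; omega

-- one greedy step: A's (max of the window, leftmost index) coincide with B's argmax fold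
theorem step_eq (xs : List Int) (num : Int) (hnum : num < 11)
    (hlen : 12 - num ≤ (xs.length : Int)) :
    ∃ (m : Int) (i : Nat),
      PySem.List.max? (PySem.List.slice xs none (some (-11 + num))) (fun x => x) = some m ∧
      PySem.List.index? xs m = some i ∧
      (PySem.List.pyRange 1 (((PySem.List.slice xs none (some (-11 + num))).length : Int)) 1).foldl
          (fun b j =>
            if PySem.List.pyGetD (PySem.List.slice xs none (some (-11 + num))) j 0 >
                PySem.List.pyGetD (PySem.List.slice xs none (some (-11 + num))) b 0 then j else b) 0
        = (i : Int) ∧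
      PySem.List.pyGetD (PySem.List.slice xs none (some (-11 + num))) (i : Int) 0 = m ∧
      i + 1 < xs.length ∧
      12 - (num + 1) ≤ ((xs.length - (i + 1) : Nat) : Int) := by
  set k : Nat := (11 - num).toNat with hk
  have hkpos : 0 < k := by omega
  have hkcast : (k : Int) = 11 - num := by omega
  have hklen : k + 1 ≤ xs.length := by omega
  set n : Nat := xs.length - k with hn
  have hn1 : 1 ≤ n := by omega
  have hnlen : n ≤ xs.length := by omega
  have hslice : PySem.List.slice xs none (some (-11 + num)) = xs.take n := by
    rw [show (-11 + num) = -(k : Int) by omega, PySem.List.slice_to_neg_natCast xs k hkpos]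
  rw [hslice]
  set w : List Int := xs.take n with hw
  have hwlen : w.length = n := by simp [hw, hnlen]
  obtain ⟨bn, hfold, hbn, hmaxp, hleft⟩ := argmax_inv w n hn1 (by omega)
  have hbnw : bn < w.length := by omega
  have hbnlen : bn < xs.length := by omega
  have hwget : ∀ t, (ht : t < n) → w.getD t 0 = xs.getD t 0 := by
    intro t ht
    rw [List.getD_eq_getElem w 0 (by omega), List.getD_eq_getElem xs 0 (by omega)]
    simp [hw, List.getElem_take]
  cases hmax : PySem.List.max? w (fun x => x) with
  | none =>
    exfalso
    have := (PySem.List.max?_eq_none_iff w (fun x => x)).mp hmax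
    have : w.length = 0 := by rw [this]; rfl
    omega
  | some m =>
    have hmval : m = w.getD bn 0 := by
      have hmem := PySem.List.max?_mem hmax
      obtain ⟨t, htl, hteq⟩ := List.mem_iff_getElem.mp hmem
      have htn : t < n := by omega
      have h1 : m ≤ w.getD bn 0 := by
        have : w.getD t 0 = m := by rw [List.getD_eq_getElem w 0 htl]; exact hteq
        rw [← this]; exact hmaxp t htn
      have h2 : w.getD bn 0 ≤ m := by
        have hmem2 : w.getD bn 0 ∈ w := by
          rw [List.getD_eq_getElem w 0 hbnw]
          exact List.getElem_mem _
        exact PySem.List.max?_isMax hmax _ hmem2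
      omega
    have hxbn : xs.getD bn 0 = m := by rw [← hwget bn hbn, ← hmval]
    have hidx : PySem.List.index? xs m = some bn := by
      rw [PySem.List.index?_eq_some_iff]
      refine ⟨xs.take bn, xs.drop (bn + 1), ?_, by simp; omega, ?_⟩
      · conv_lhs => rw [← List.take_append_drop bn xs]
        rw [List.drop_eq_getElem_cons hbnlen]
        congr 1
        rw [← hxbn, List.getD_eq_getElem xs 0 hbnlen]
      · intro hmem
        obtain ⟨t, htl, hteq⟩ := List.mem_iff_getElem.mp hmem
        have htbn : t < bn := by simp at htl; omega
        have hlt : w.getD t 0 < w.getD bn 0 := hleft t htbn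
        rw [hwget t (by omega), hwget bn hbn] at hlt
        have h3 : xs.getD t 0 = m := by
          rw [List.getD_eq_getElem xs 0 (by omega : t < xs.length), ← hteq]
          simp [List.getElem_take]
        omega
    refine ⟨m, bn, rfl, hidx, by rw [hwlen, hfold], ?_, by omega, by omega⟩
    rw [PySem.List.pyGetD_natCast, ← hmval]

theorem max_singleton (x : Int) (s : String) :
    (match PySem.List.max? [x] (fun y => y) with
      | none => s
      | some m => PySem.Int.toStr m) = PySem.Int.toStr x := by
  cases hmax : PySem.List.max? [x] (fun y => y) with
  | none => simp [PySem.List.max?_eq_none_iff] at hmax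
  | some m =>
    have := PySem.List.max?_mem hmax
    simp at this
    simp [this]

theorem loop_eq (fuel : Nat) : ∀ (bank : List Int) (num : Int) (parts : String),
    (11 - num).toNat = fuel → Pre_find_max_jolts_r bank num →
    altLoop parts bank num = parts ++ find_max_jolts_r bank num := by
  induction fuel with
  | zero =>
    intro bank num parts hfuel hpre
    have h11 : 11 ≤ num := by omega
    by_cases heq : num = 11
    · subst heq
      rw [altLoop, find_max_jolts_r]
      simp only [lt_irrefl, false_and, if_false]
      by_cases hlen : 1 < bank.length
      · simp [hlen]
      · have hone : bank.length = 1 := by rcases hpre with h | h <;> omega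
        obtain ⟨x, hx⟩ := List.length_eq_one_iff.mp hone
        subst hx
        simp only [hone, lt_irrefl, if_false]
        rw [max_singleton]
        simp [PySem.List.pyGetD_zero_cons]
    · have hone : bank.length = 1 := by rcases hpre with h | h <;> omega
      rw [altLoop, find_max_jolts_r]
      simp [hone, heq]
  | succ fuel ih =>
    intro bank num parts hfuel hpre
    have hnum : num < 11 := by omega
    by_cases hlen : 1 < bank.length
    · have hlenb : 12 - num ≤ (bank.length : Int) := by
        rcases hpre with h | h
        · omega
        · exact h.2
      obtain ⟨m, i, hmax, hidx, hfold, hval, hilt, hrec⟩ := step_eq bank num hnum hlenb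
      rw [altLoop, find_max_jolts_r]
      simp only [if_pos (And.intro hnum hlen), if_neg (by omega : ¬ num = 11),
        if_neg (by omega : ¬ bank.length = 1), hmax, hfold, hval]
      have hpre' : Pre_find_max_jolts_r (PySem.List.slice bank (some ((i : Int) + 1)) none) (num + 1) := by
        right
        refine ⟨by omega, ?_⟩
        have e : ((i : Int) + 1) = ((i + 1 : Nat) : Int) := by push_cast; ring
        rw [e, PySem.List.slice_from_natCast]
        simpa using hrec
      rw [ih _ _ _ (by omega) hpre']
      rw [String.append_assoc]
      congr 1
      split
      · rename_i heq
        rw [hidx] at heq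
        exact absurd heq (by simp)
      · rename_i i' heq
        rw [hidx] at heq
        injection heq with heq'
        subst heq'
        rfl
    · have hone : bank.length = 1 := by rcases hpre with h | h <;> omega
      rw [altLoop, find_max_jolts_r]
      simp only [hone, if_neg (by omega : ¬ num = 11)]
      simp

-- ===== VERDICT (by name: the statement is the Claim_ definition above) =====
theorem find_max_jolts_r_spec : Claim_equal_find_max_jolts_r := by
  intro bank num _ hpre
  unfold Spec_find_max_jolts_r find_max_jolts_r_alt
  have := loop_eq (11 - num).toNat bank num "" rfl hpre
  rw [this]; simp
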